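-- pv_equiv track=rewrite | github.com/MotzWanted/codeseeker | src/dataloader/mdace/mdace_icd9_inpatient.py | _generate_code_mapping
-- ===== SOURCE A (Python) =====
-- def _generate_code_mapping(old_codes: set[str], new_codes: set[str]) -> dict[str, str]:
--     """Generate a mapping from old ICD-9 codes to new ICD-9 codes."""
--     mapping = {}
--     for new_code in new_codes:
--         temp_code = new_code
--         while temp_code and temp_code not in old_codes:
--             temp_code = temp_code[:-1]
--         mapping[new_code] = temp_code if temp_code else new_code
--     return mapping
-- ===== SOURCE B (Python) =====
-- def _generate_code_mapping(old_codes: set[str], new_codes: set[str]) -> dict[str, str]: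
--     """Generate a mapping from old ICD-9 codes to new ICD-9 codes."""
--     mapping = {}
--     for new_code in new_codes:
--         best = ""
--         for old in old_codes:
--             if old and len(best) < len(old) and new_code.startswith(old):
--                 best = old
--         mapping[new_code] = best if best else new_code
--     return mapping
-- ===== Notes on version B (the rewrite author's own statement) =====
-- stated objective: alternative
-- what changed: A repeatedly truncates each new code and does a set-membership test per truncation; B instead scans old_codes once per new code with a startswith test, keeping the longest old code that is a prefix.
import Mathlib
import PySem

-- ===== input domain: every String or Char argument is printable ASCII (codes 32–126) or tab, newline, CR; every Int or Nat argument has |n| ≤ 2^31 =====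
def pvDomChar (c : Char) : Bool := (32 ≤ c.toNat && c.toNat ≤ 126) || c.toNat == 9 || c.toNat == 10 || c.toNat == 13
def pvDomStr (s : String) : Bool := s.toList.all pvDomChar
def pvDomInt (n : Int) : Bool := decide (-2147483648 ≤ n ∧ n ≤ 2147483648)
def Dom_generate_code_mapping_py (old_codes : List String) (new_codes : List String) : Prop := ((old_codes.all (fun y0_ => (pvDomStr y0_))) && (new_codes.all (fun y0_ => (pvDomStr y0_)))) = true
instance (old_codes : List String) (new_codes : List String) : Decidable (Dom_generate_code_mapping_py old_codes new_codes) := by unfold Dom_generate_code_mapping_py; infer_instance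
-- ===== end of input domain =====

-- B replaces A's truncate-and-look-up loop by a single scan over old_codes keeping the longest prefix match: an alternative decomposition of the same longest-prefix lookup.


-- ===== PORT A =====
-- the 'while temp_code and temp_code not in old_codes: temp_code = temp_code[:-1]' loop (temp_code[:-1] = dropLast on the char list)
def pvALoop (old_codes : List String) (t : List Char) : List Char :=
  if h : t ≠ [] ∧ ¬ old_codes.contains (String.ofList t) then pvALoop old_codes t.dropLast
  else t
termination_by t.length
decreasing_by
  have ht : t ≠ [] := h.1
  have : t.length ≠ 0 := by simpa using ht
  simp [List.length_dropLast]
  omega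

def generate_code_mapping_py (old_codes : List String) (new_codes : List String) : List (String × String) :=
  (new_codes.foldl (fun mapping new_code =>
    let temp_code := pvALoop old_codes new_code.toList
    PySem.Dict.insert mapping new_code (if temp_code ≠ [] then String.ofList temp_code else new_code))
    (PySem.Dict.empty : PySem.Dict String String)).items

-- ===== PORT B =====
-- inner scan: longest non-empty old code that is a prefix of new_code ("" if none)
def pvBest (old_codes : List String) (new_code : String) : String :=
  old_codes.foldl (fun best old =>
    if old ≠ "" ∧ PySem.Str.len best < PySem.Str.len old ∧ PySem.Str.startswith new_code old then old else best) ""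

def generate_code_mapping_py_alt (old_codes : List String) (new_codes : List String) : List (String × String) :=
  (new_codes.foldl (fun mapping new_code =>
    let best := pvBest old_codes new_code
    PySem.Dict.insert mapping new_code (if best ≠ "" then best else new_code))
    (PySem.Dict.empty : PySem.Dict String String)).items

-- ===== PRECONDITION & SPEC =====
def Spec_generate_code_mapping_py (old_codes : List String) (new_codes : List String) (out : List (String × String)) : Prop := out = generate_code_mapping_py_alt old_codes new_codes
instance (old_codes : List String) (new_codes : List String) (out : List (String × String)) : Decidable (Spec_generate_code_mapping_py old_codes new_codes out) := by unfold Spec_generate_code_mapping_py; infer_instance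

-- ===== CLAIM (what is proved, stated in full; the proofs are below) =====
def Claim_equal_generate_code_mapping_py : Prop := ∀ (old_codes : List String) (new_codes : List String), Dom_generate_code_mapping_py old_codes new_codes → Spec_generate_code_mapping_py old_codes new_codes (generate_code_mapping_py old_codes new_codes)

-- ===== LEMMAS AND PROOFS =====

-- s = "" exactly when its char list is empty
theorem pv_eq_empty_iff (s : String) : s = "" ↔ s.toList = [] := by
  constructor
  · intro h; subst h; rfl
  · intro h; rw [← String.ofList_toList (s := s), h]

-- a strict prefix is a prefix of dropLast
theorem pv_prefix_dropLast {p t : List Char} (hp : p <+: t) (hne : p ≠ t) : p <+: t.dropLast := by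
  have hlt : p.length < t.length := by
    rcases lt_or_eq_of_le hp.length_le with h | h
    · exact h
    · exact absurd (hp.eq_of_length h) hne
  rw [List.prefix_iff_eq_take] at hp ⊢
  rw [List.dropLast_eq_take, List.take_take]
  have : min p.length (t.length - 1) = p.length := by omega
  rw [this]; exact hp

-- characterisation of A's loop: result is a prefix, is in old_codes when non-empty, and dominates every non-empty prefix in old_codes
theorem pvALoop_spec (old_codes : List String) (t : List Char) :
    pvALoop old_codes t <+: t ∧
    (pvALoop old_codes t ≠ [] → old_codes.contains (String.ofList (pvALoop old_codes t))) ∧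
    (∀ p, p <+: t → p ≠ [] → old_codes.contains (String.ofList p) → p.length ≤ (pvALoop old_codes t).length) := by
  fun_induction pvALoop old_codes t with
  | case1 t h ih =>
      obtain ⟨hpre, hmem, hmax⟩ := ih
      refine ⟨hpre.trans (List.dropLast_prefix t), hmem, ?_⟩
      intro p hp hne hc
      refine hmax p (pv_prefix_dropLast hp ?_) hne hc
      intro hpt
      exact h.2 (by rw [← hpt]; exact hc)
  | case2 t h =>
      rcases not_and_or.mp h with h1 | h2
      · have : t = [] := by simpa using h1
        subst this
        exact ⟨List.prefix_refl _, fun hne => absurd rfl hne, fun p hp hne _ => absurd (List.prefix_nil.mp hp) hne⟩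
      · refine ⟨List.prefix_refl _, fun _ => not_not.mp h2, fun p hp _ _ => hp.length_le⟩

-- invariant of B's fold: the accumulator only grows, ends at an element (or stays), and dominates all matching elements
theorem pvBest_inv (nc : String) (l : List String) (acc : String) :
    (l.foldl (fun best old =>
      if old ≠ "" ∧ PySem.Str.len best < PySem.Str.len old ∧ PySem.Str.startswith nc old then old else best) acc = acc ∨
     (l.foldl (fun best old =>
      if old ≠ "" ∧ PySem.Str.len best < PySem.Str.len old ∧ PySem.Str.startswith nc old then old else best) acc ∈ l ∧
      l.foldl (fun best old =>
      if old ≠ "" ∧ PySem.Str.len best < PySem.Str.len old ∧ PySem.Str.startswith nc old then old else best) acc ≠ "" ∧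
      PySem.Str.startswith nc (l.foldl (fun best old =>
      if old ≠ "" ∧ PySem.Str.len best < PySem.Str.len old ∧ PySem.Str.startswith nc old then old else best) acc) = true)) ∧
    PySem.Str.len acc ≤ PySem.Str.len (l.foldl (fun best old =>
      if old ≠ "" ∧ PySem.Str.len best < PySem.Str.len old ∧ PySem.Str.startswith nc old then old else best) acc) ∧
    (∀ o ∈ l, o ≠ "" → PySem.Str.startswith nc o = true →
      PySem.Str.len o ≤ PySem.Str.len (l.foldl (fun best old =>
      if old ≠ "" ∧ PySem.Str.len best < PySem.Str.len old ∧ PySem.Str.startswith nc old then old else best) acc)) := by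
  induction l generalizing acc with
  | nil => exact ⟨Or.inl rfl, le_refl _, by simp⟩
  | cons x xs ih =>
      simp only [List.foldl_cons]
      by_cases hc : x ≠ "" ∧ PySem.Str.len acc < PySem.Str.len x ∧ PySem.Str.startswith nc x = true
      · rw [if_pos hc]
        obtain ⟨hr, hle, hall⟩ := ih x
        refine ⟨?_, le_trans (le_of_lt hc.2.1) hle, ?_⟩
        · rcases hr with hr | ⟨hm, hne, hsw⟩
          · exact Or.inr ⟨by rw [hr]; exact List.mem_cons_self, by rw [hr]; exact hc.1, by rw [hr]; exact hc.2.2⟩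
          · exact Or.inr ⟨List.mem_cons_of_mem _ hm, hne, hsw⟩
        · intro o ho hon hosw
          rcases List.mem_cons.mp ho with ho | ho
          · subst ho; exact hle
          · exact hall o ho hon hosw
      · rw [if_neg hc]
        obtain ⟨hr, hle, hall⟩ := ih acc
        refine ⟨?_, hle, ?_⟩
        · rcases hr with hr | ⟨hm, hne, hsw⟩
          · exact Or.inl hr
          · exact Or.inr ⟨List.mem_cons_of_mem _ hm, hne, hsw⟩
        · intro o ho hon hosw
          rcases List.mem_cons.mp ho with ho | ho
          · subst ho
            push Not at hc
            have := hc hon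
            have hx : PySem.Str.len acc < PySem.Str.len o → PySem.Str.startswith nc o ≠ true := this
            by_cases hlt : PySem.Str.len acc < PySem.Str.len o
            · exact absurd hosw (hx hlt)
            · push Not at hlt; exact le_trans hlt hle
          · exact hall o ho hon hosw

-- per-new-code value agreement
theorem pv_value_eq (old_codes : List String) (nc : String) :
    (if pvALoop old_codes nc.toList ≠ [] then String.ofList (pvALoop old_codes nc.toList) else nc) =
    (if pvBest old_codes nc ≠ "" then pvBest old_codes nc else nc) := by
  obtain ⟨hApre, hAmem, hAmax⟩ := pvALoop_spec old_codes nc.toList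
  obtain ⟨hBr, -, hBall⟩ := pvBest_inv nc old_codes ""
  set r := pvALoop old_codes nc.toList with hrdef
  set b := pvBest old_codes nc with hbdef
  -- translate B's facts to the char-list level
  have hsw_iff : ∀ s : String, PySem.Str.startswith nc s = true ↔ s.toList <+: nc.toList := by
    intro s; rw [PySem.Str.startswith_eq]; exact PySem.Chars.startswith_iff nc.toList s.toList
  by_cases hex : ∃ p, p <+: nc.toList ∧ p ≠ [] ∧ old_codes.contains (String.ofList p)
  · obtain ⟨p, hp, hpne, hpc⟩ := hex
    -- both sides are non-empty
    have hrne : r ≠ [] := by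
      intro hre
      have := hAmax p hp hpne hpc
      rw [hre] at this
      simp at this
      exact hpne this
    have hplen : 0 < (p.length : Int) := by
      have : p.length ≠ 0 := fun h => hpne (List.length_eq_zero_iff.mp h)
      omega
    have hplenB : (p.length : Int) ≤ PySem.Str.len b := by
      have := hBall (String.ofList p) (List.contains_iff_mem.mp hpc)
        (by rw [Ne, pv_eq_empty_iff]; simpa using hpne)
        ((hsw_iff _).mpr (by simpa using hp))
      rwa [PySem.Str.len_eq, String.toList_ofList] at this
    have hbne : b ≠ "" := by
      intro hbe
      rw [hbe] at hplenB
      have h0 : PySem.Str.len "" = (0 : Int) := by simp [PySem.Str.len_eq]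
      rw [h0] at hplenB
      omega
    -- b is a matching element
    have hbgood : b ∈ old_codes ∧ b.toList <+: nc.toList := by
      rcases hBr with hbe | ⟨hm, -, hsw⟩
      · exact absurd hbe hbne
      · exact ⟨hm, (hsw_iff b).mp hsw⟩
    -- length b ≤ length r
    have hbr : b.toList.length ≤ r.length := by
      refine hAmax b.toList hbgood.2 (fun h => hbne ((pv_eq_empty_iff b).mpr h)) ?_
      rw [String.ofList_toList]
      exact List.contains_iff_mem.mpr hbgood.1
    -- length r ≤ length b
    have hrb : (r.length : Int) ≤ PySem.Str.len b := by
      have := hBall (String.ofList r) (List.contains_iff_mem.mp (hAmem hrne))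
        (by rw [Ne, pv_eq_empty_iff]; simpa using hrne)
        ((hsw_iff _).mpr (by simpa using hApre))
      rwa [PySem.Str.len_eq, String.toList_ofList] at this
    have hlen : r.length = b.toList.length := by
      rw [PySem.Str.len_eq] at hrb
      omega
    -- two prefixes of the same list with equal length are equal
    have hreq : r = b.toList := by
      rw [List.prefix_iff_eq_take] at hApre
      have := hbgood.2
      rw [List.prefix_iff_eq_take] at this
      rw [hApre, this, hlen]
    rw [if_pos hrne, if_pos hbne, hreq, String.ofList_toList]
  · push Not at hex
    have hre : r = [] := by
      by_contra hrne
      exact (hex r hApre hrne) (hAmem hrne)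
    have hbe : b = "" := by
      rcases hBr with hbe | ⟨hm, hne, hsw⟩
      · exact hbe
      · exfalso
        refine hex b.toList ((hsw_iff b).mp hsw) ?_ ?_
        · rw [Ne, ← pv_eq_empty_iff]; exact hne
        · rw [String.ofList_toList]; exact List.contains_iff_mem.mpr hm
    rw [if_neg (by simp [hre]), if_neg (by simp [hbe])]

-- ===== VERDICT (by name: the statement is the Claim_ definition above) =====
theorem generate_code_mapping_py_spec : Claim_equal_generate_code_mapping_py := by
  intro old_codes new_codes _
  unfold Spec_generate_code_mapping_py generate_code_mapping_py generate_code_mapping_py_alt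
  have hf : (fun (mapping : PySem.Dict String String) new_code =>
      let temp_code := pvALoop old_codes new_code.toList
      PySem.Dict.insert mapping new_code (if temp_code ≠ [] then String.ofList temp_code else new_code)) =
      (fun (mapping : PySem.Dict String String) new_code =>
      let best := pvBest old_codes new_code
      PySem.Dict.insert mapping new_code (if best ≠ "" then best else new_code)) := by
    funext mapping nc
    simp only [pv_value_eq old_codes nc]
  rw [hf]
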